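-- pv_equiv track=rewrite | github.com/vicvv/algo | dynamic/squareOfZeroes.py | hasSquareOfZeroes
-- ===== SOURCE A (Python) =====
-- def hasSquareOfZeroes(matrix, r1,c1, r2, c2,cache):
-- 	if r1 >= r2 or c1 >= c2:
-- 		return False
-- 	key = str(r1) + "-" + str(c1) + "-" + str(r2) + "-" + str(c2)
--
-- 	if key in cache:
-- 		return cache[key]
-- 	cache[key] = (
-- 		isSquareOfZeros(matrix,r1,c1, r2, c2)
-- 		or hasSquareOfZeroes(matrix,r1 + 1,c1 + 1, r2 -1, c2 -1,cache)
-- 		or hasSquareOfZeroes(matrix,r1,c1 +1, r2-1, c2,cache)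
-- 		or hasSquareOfZeroes(matrix,r1 +1,c1, r2, c2-1,cache)
-- 		or hasSquareOfZeroes(matrix,r1 +1,c1+1, r2, c2,cache)
-- 		or hasSquareOfZeroes(matrix,r1,c1, r2 - 1, c2 -1 ,cache)
-- 	)
-- 	return cache[key]
--
-- def isSquareOfZeros(matrix, r1, c1, r2, c2):
--     for row in range(r1, r2+1):
--         if matrix[row][c1] != 0 or matrix[row][c2] != 0:
--             return False
--     for col in range(c1, c2+1):
--         if matrix[r1][col] != 0 or matrix[r2][col] != 0:
--             return False
--     return True
-- ===== SOURCE B (Python) =====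
-- def hasSquareOfZeroes(matrix, r1, c1, r2, c2, cache):
--     if r1 >= r2 or c1 >= c2:
--         return False
--     h = r2 - r1
--     w = c2 - c1
--     smax = min(h, w) - 1
--     # zero-run lengths to the right and downward, over the band [r1..r2] x [c1..c2]
--     right = [[0] * (w + 1) for _ in range(h + 1)]
--     down = [[0] * (w + 1) for _ in range(h + 1)]
--     for i in range(h, -1, -1):
--         for j in range(w, -1, -1):
--             if matrix[r1 + i][c1 + j] == 0:
--                 right[i][j] = 1 + (right[i][j + 1] if j < w else 0)
--                 down[i][j] = 1 + (down[i + 1][j] if i < h else 0)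
--     # bottom-up over shrink levels s: nodes (a,b,c,d) with (a-r1)+(r2-c) = (b-c1)+(c2-d) = s;
--     # nxt holds level s+1, nxt2 level s+2 (the five recursive moves of the spec land there)
--     nxt, nxt2 = [], []
--     for s in range(smax, -1, -1):
--         cur = []
--         for da in range(s + 1):
--             a, c = r1 + da, r2 - (s - da)
--             row = []
--             for db in range(s + 1):
--                 b, d = c1 + db, c2 - (s - db)
--                 key = str(a) + "-" + str(b) + "-" + str(c) + "-" + str(d)
--                 if key in cache:
--                     row.append(cache[key])
--                 else:
--                     v = (right[a - r1][b - c1] >= d - b + 1 and right[c - r1][b - c1] >= d - b + 1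
--                          and down[a - r1][b - c1] >= c - a + 1 and down[a - r1][d - c1] >= c - a + 1)
--                     if not v and nxt:
--                         v = nxt[da][db + 1] or nxt[da + 1][db] or nxt[da + 1][db + 1] or nxt[da][db]
--                     if not v and nxt2:
--                         v = nxt2[da + 1][db + 1]
--                     row.append(bool(v))
--             cur.append(row)
--         nxt, nxt2 = cur, nxt
--     return nxt[0][0]
-- ===== Notes on version B (the rewrite author's own statement) =====
-- stated objective: alternative
-- what changed: Replaces A's top-down 5-way memoized recursion, which rescans up to four O(n) border strips at each of its O(n^3) reachable sub-rectangles, by a bottom-up dynamic program over shrink levels with precomputed consecutive-zero run tables (right/down), so every border test and child lookup is a table read; worst-case cost drops from O(n^4) to O(n^3) but no speed-up was confirmed.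
-- outside the precondition, e.g. on hasSquareOfZeroes([[0]], -1, -1, 0, 0, {}): A returns True, B returns True; on hasSquareOfZeroes([[-1, 1, 1], [2, 10, 2], [10, 10, -1]], -1, 1, 5, 2, {}): A returns False, B raises IndexError; on hasSquareOfZeroes([[0, 0], [0, 0]], 0, 0, 1, 2, {}): A raises IndexError, B raises IndexError
import Mathlib
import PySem

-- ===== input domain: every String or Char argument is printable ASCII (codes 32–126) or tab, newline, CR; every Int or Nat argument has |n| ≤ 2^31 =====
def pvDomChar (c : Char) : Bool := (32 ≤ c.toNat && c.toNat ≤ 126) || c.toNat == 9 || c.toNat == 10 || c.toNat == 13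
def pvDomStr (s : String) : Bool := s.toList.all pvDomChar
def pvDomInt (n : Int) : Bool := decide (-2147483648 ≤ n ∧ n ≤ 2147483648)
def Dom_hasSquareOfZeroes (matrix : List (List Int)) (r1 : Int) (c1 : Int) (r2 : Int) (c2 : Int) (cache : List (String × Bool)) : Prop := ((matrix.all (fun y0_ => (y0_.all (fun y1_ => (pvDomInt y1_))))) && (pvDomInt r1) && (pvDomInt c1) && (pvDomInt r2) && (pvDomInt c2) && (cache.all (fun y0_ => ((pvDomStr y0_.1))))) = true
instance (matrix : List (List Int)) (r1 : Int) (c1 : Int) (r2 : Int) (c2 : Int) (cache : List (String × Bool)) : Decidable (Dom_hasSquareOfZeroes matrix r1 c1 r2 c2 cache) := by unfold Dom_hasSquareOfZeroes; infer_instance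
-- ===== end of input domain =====

-- B replaces A's top-down 5-way memoized recursion (O(n) border scans at each of its
-- O(n^3) states) by a bottom-up dynamic program over shrink levels with precomputed
-- zero-run tables giving O(1) border checks.  Python A mutates the `cache` argument in
-- place; the equivalence proved here is about the RETURN value only.

-- shared helper: Python's str(r1)+"-"+str(c1)+"-"+str(r2)+"-"+str(c2) (both sources build it)
def pvKey (r1 c1 r2 c2 : Int) : String :=
  PySem.Int.toStr r1 ++ "-" ++ PySem.Int.toStr c1 ++ "-" ++ PySem.Int.toStr r2 ++ "-" ++ PySem.Int.toStr c2

-- shared helper: matrix[i][j]; exact for in-range indices (guaranteed by Pre_);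
-- Python raises IndexError on out-of-range reads, where nothing is claimed
def pvGetv (matrix : List (List Int)) (i j : Int) : Int :=
  PySem.List.pyGetD (PySem.List.pyGetD matrix i []) j 1

-- ===== PORT A =====
def pvIsSquareOfZeros (matrix : List (List Int)) (r1 c1 r2 c2 : Int) : Bool :=
  ((PySem.List.pyRange r1 (r2 + 1) 1).all fun row =>
      !(pvGetv matrix row c1 != 0 || pvGetv matrix row c2 != 0)) &&
  ((PySem.List.pyRange c1 (c2 + 1) 1).all fun col =>
      !(pvGetv matrix r1 col != 0 || pvGetv matrix r2 col != 0))

-- Python's short-circuiting `or` over the stateful recursive calls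
def pvStep (p : Bool × PySem.Dict String Bool)
    (f : PySem.Dict String Bool → Bool × PySem.Dict String Bool) : Bool × PySem.Dict String Bool :=
  if p.1 then p else f p.2

def pvGoA (matrix : List (List Int)) (r1 c1 r2 c2 : Int) (cache : PySem.Dict String Bool) :
    Bool × PySem.Dict String Bool :=
  if r1 ≥ r2 ∨ c1 ≥ c2 then (false, cache)
  else
    match cache.get? (pvKey r1 c1 r2 c2) with
    | some v => (v, cache)
    | none =>
      let p5 :=
        pvStep (pvStep (pvStep (pvStep
          (if pvIsSquareOfZeros matrix r1 c1 r2 c2 then (true, cache)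
           else pvGoA matrix (r1 + 1) (c1 + 1) (r2 - 1) (c2 - 1) cache)
          (fun cch => pvGoA matrix r1 (c1 + 1) (r2 - 1) c2 cch))
          (fun cch => pvGoA matrix (r1 + 1) c1 r2 (c2 - 1) cch))
          (fun cch => pvGoA matrix (r1 + 1) (c1 + 1) r2 c2 cch))
          (fun cch => pvGoA matrix r1 c1 (r2 - 1) (c2 - 1) cch)
      (p5.1, p5.2.insert (pvKey r1 c1 r2 c2) p5.1)
termination_by (r2 - r1 + c2 - c1).toNat
decreasing_by all_goals omega

def hasSquareOfZeroes (matrix : List (List Int)) (r1 : Int) (c1 : Int) (r2 : Int) (c2 : Int)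
    (cache : List (String × Bool)) : Bool :=
  (pvGoA matrix r1 c1 r2 c2
    (cache.foldl (fun d kv => d.insert kv.1 kv.2) PySem.Dict.empty)).1

-- ===== PORT B =====
-- one row of the two zero-run tables, built right-to-left (columns j = w-k+1 .. w)
def pvRowAux (matrix : List (List Int)) (r1 c1 h w i : Int) (prevDown : List Int) :
    Nat → List Int × List Int
  | 0 => ([], [])
  | k + 1 =>
    let pr := pvRowAux matrix r1 c1 h w i prevDown k
    let j : Int := w - k
    if pvGetv matrix (r1 + i) (c1 + j) == 0 then
      ((1 + (if j < w then pr.1.headD 0 else 0)) :: pr.1,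
       (1 + (if i < h then PySem.List.pyGetD prevDown j 0 else 0)) :: pr.2)
    else (0 :: pr.1, 0 :: pr.2)

-- the (right, down) tables, rows built bottom-to-top (rows i = h-k+1 .. h)
def pvTables (matrix : List (List Int)) (r1 c1 h w : Int) :
    Nat → List (List Int) × List (List Int)
  | 0 => ([], [])
  | k + 1 =>
    let pt := pvTables matrix r1 c1 h w k
    let row := pvRowAux matrix r1 c1 h w (h - k) (pt.2.headD []) (w.toNat + 1)
    (row.1 :: pt.1, row.2 :: pt.2)

-- the table of values of one shrink level s, from the tables of levels s+1 and s+2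
def pvLevel (r1 c1 r2 c2 : Int) (d0 : PySem.Dict String Bool)
    (right down : List (List Int)) (s : Int) (nxt nxt2 : List (List Bool)) : List (List Bool) :=
  (PySem.List.pyRange 0 (s + 1) 1).map fun da =>
    (PySem.List.pyRange 0 (s + 1) 1).map fun db =>
      let a := r1 + da
      let c := r2 - (s - da)
      let b := c1 + db
      let d := c2 - (s - db)
      match d0.get? (pvKey a b c d) with
      | some v => v
      | none =>
        let v0 :=
          decide (PySem.List.pyGetD (PySem.List.pyGetD right (a - r1) []) (b - c1) 0 ≥ d - b + 1) &&
          decide (PySem.List.pyGetD (PySem.List.pyGetD right (c - r1) []) (b - c1) 0 ≥ d - b + 1) &&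
          decide (PySem.List.pyGetD (PySem.List.pyGetD down (a - r1) []) (b - c1) 0 ≥ c - a + 1) &&
          decide (PySem.List.pyGetD (PySem.List.pyGetD down (a - r1) []) (d - c1) 0 ≥ c - a + 1)
        let v1 :=
          if !v0 && !nxt.isEmpty then
            PySem.List.pyGetD (PySem.List.pyGetD nxt da []) (db + 1) false ||
            PySem.List.pyGetD (PySem.List.pyGetD nxt (da + 1) []) db false ||
            PySem.List.pyGetD (PySem.List.pyGetD nxt (da + 1) []) (db + 1) false ||
            PySem.List.pyGetD (PySem.List.pyGetD nxt da []) db false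
          else v0
        if !v1 && !nxt2.isEmpty then
          PySem.List.pyGetD (PySem.List.pyGetD nxt2 (da + 1) []) (db + 1) false
        else v1

def pvLevels (r1 c1 r2 c2 : Int) (d0 : PySem.Dict String Bool)
    (right down : List (List Int)) (smax : Int) :
    Nat → List (List Bool) × List (List Bool)
  | 0 => ([], [])
  | k + 1 =>
    let p := pvLevels r1 c1 r2 c2 d0 right down smax k
    (pvLevel r1 c1 r2 c2 d0 right down (smax - k) p.1 p.2, p.1)

def hasSquareOfZeroes_alt (matrix : List (List Int)) (r1 : Int) (c1 : Int) (r2 : Int) (c2 : Int)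
    (cache : List (String × Bool)) : Bool :=
  if r1 ≥ r2 ∨ c1 ≥ c2 then false
  else
    let d0 := cache.foldl (fun d kv => d.insert kv.1 kv.2) PySem.Dict.empty
    let h := r2 - r1
    let w := c2 - c1
    let smax := min h w - 1
    let t := pvTables matrix r1 c1 h w (h.toNat + 1)
    let fin := pvLevels r1 c1 r2 c2 d0 t.1 t.2 smax (smax.toNat + 1)
    PySem.List.pyGetD (PySem.List.pyGetD fin.1 0 []) 0 false

-- ===== PRECONDITION & SPEC =====
-- Pre_ restricts the non-trivial case (r1 < r2 and c1 < c2) to the natural domain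
-- 0 ≤ r1, 0 ≤ c1 with the band of rows r1..r2 inside the matrix and wide enough:
-- outside it Python A either raises IndexError or reads cells through Python's
-- negative-index wraparound, an accident of the list representation.
def Pre_hasSquareOfZeroes (matrix : List (List Int)) (r1 : Int) (c1 : Int) (r2 : Int) (c2 : Int)
    (cache : List (String × Bool)) : Prop :=
  r2 ≤ r1 ∨ c2 ≤ c1 ∨
    (0 ≤ r1 ∧ 0 ≤ c1 ∧ r2 < (matrix.length : Int) ∧
      ∀ i ∈ List.range matrix.length,
        r1 ≤ (i : Int) → (i : Int) ≤ r2 → c2 < ((matrix.getD i []).length : Int))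
instance (matrix : List (List Int)) (r1 : Int) (c1 : Int) (r2 : Int) (c2 : Int)
    (cache : List (String × Bool)) : Decidable (Pre_hasSquareOfZeroes matrix r1 c1 r2 c2 cache) := by
  unfold Pre_hasSquareOfZeroes; infer_instance

def pvWitness_hasSquareOfZeroes : List (List Int) × Int × Int × Int × Int × (List (String × Bool)) :=
  ([[0, 0], [0, 0]], 0, 0, 1, 1, [])

def Spec_hasSquareOfZeroes (matrix : List (List Int)) (r1 : Int) (c1 : Int) (r2 : Int) (c2 : Int)
    (cache : List (String × Bool)) (out : Bool) : Prop :=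
  out = hasSquareOfZeroes_alt matrix r1 c1 r2 c2 cache
instance (matrix : List (List Int)) (r1 : Int) (c1 : Int) (r2 : Int) (c2 : Int)
    (cache : List (String × Bool)) (out : Bool) :
    Decidable (Spec_hasSquareOfZeroes matrix r1 c1 r2 c2 cache out) := by
  unfold Spec_hasSquareOfZeroes; infer_instance

-- ===== CLAIM (what is proved, stated in full; the proofs are below) =====
def Claim_equal_hasSquareOfZeroes : Prop := ∀ (matrix : List (List Int)) (r1 : Int) (c1 : Int) (r2 : Int) (c2 : Int) (cache : List (String × Bool)), Dom_hasSquareOfZeroes matrix r1 c1 r2 c2 cache → Pre_hasSquareOfZeroes matrix r1 c1 r2 c2 cache → Spec_hasSquareOfZeroes matrix r1 c1 r2 c2 cache (hasSquareOfZeroes matrix r1 c1 r2 c2 cache)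

-- ===== LEMMAS AND PROOFS =====

def pvDigits (n : Nat) : List Char :=
  if h : n < 10 then [Nat.digitChar n] else pvDigits (n / 10) ++ [Nat.digitChar (n % 10)]
termination_by n
decreasing_by exact Nat.div_lt_self (by omega) (by omega)

lemma pvDigits_lt {n : Nat} (h : n < 10) : pvDigits n = [Nat.digitChar n] := by
  rw [pvDigits, dif_pos h]

lemma pvDigits_ge {n : Nat} (h : ¬ n < 10) : pvDigits n = pvDigits (n / 10) ++ [Nat.digitChar (n % 10)] := by
  conv_lhs => rw [pvDigits]
  rw [dif_neg h]

lemma pvDigits_toDigitsCore (f : Nat) : ∀ (n : Nat) (acc : List Char), n < f →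
    Nat.toDigitsCore 10 f n acc = pvDigits n ++ acc := by
  induction f with
  | zero => intro n acc h; omega
  | succ f ih =>
    intro n acc h
    rw [Nat.toDigitsCore]
    by_cases h10 : n / 10 = 0
    · rw [if_pos h10, pvDigits_lt (show n < 10 by omega)]
      rw [Nat.mod_eq_of_lt (by omega)]
      rfl
    · rw [if_neg h10, ih (n / 10) _ (by omega), pvDigits_ge (show ¬ n < 10 by omega)]
      simp

lemma pvDigits_eq_toDigits (n : Nat) : Nat.toDigits 10 n = pvDigits n := by
  rw [Nat.toDigits, pvDigits_toDigitsCore (n + 1) n [] (by omega)]; simp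

lemma pvDigitChar_toNat (k : Nat) (h : k < 10) : (Nat.digitChar k).toNat = 48 + k := by
  interval_cases k <;> rfl

lemma pvDigitChar_ne_dash (k : Nat) (h : k < 10) : Nat.digitChar k ≠ '-' := by
  intro heq
  have := congrArg Char.toNat heq
  rw [pvDigitChar_toNat k h] at this
  simp [Char.toNat] at this
  omega

lemma pvDigits_no_dash (n : Nat) : ∀ c ∈ pvDigits n, c ≠ '-' := by
  induction n using pvDigits.induct with
  | case1 n h =>
    rw [pvDigits_lt h]
    simp [pvDigitChar_ne_dash n h]
  | case2 n h ih =>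
    rw [pvDigits_ge h]
    intro c hc
    rcases List.mem_append.1 hc with h1 | h1
    · exact ih c h1
    · simp at h1; subst h1; exact pvDigitChar_ne_dash _ (Nat.mod_lt _ (by omega))

lemma pvDigits_ne_nil (n : Nat) : pvDigits n ≠ [] := by
  by_cases h : n < 10
  · rw [pvDigits_lt h]; simp
  · rw [pvDigits_ge h]; simp

lemma pvDigits_inj : ∀ (m n : Nat), pvDigits m = pvDigits n → m = n := by
  intro m
  induction m using pvDigits.induct with
  | case1 m hm =>
    intro n h
    rw [pvDigits_lt hm] at h
    by_cases hn : n < 10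
    · rw [pvDigits_lt hn] at h
      simp at h
      have := congrArg Char.toNat h
      rw [pvDigitChar_toNat m hm, pvDigitChar_toNat n hn] at this
      omega
    · exfalso
      rw [pvDigits_ge hn] at h
      have hlen := congrArg List.length h
      simp at hlen
      exact absurd hlen (pvDigits_ne_nil (n / 10))
  | case2 m hm ih =>
    intro n h
    rw [pvDigits_ge hm] at h
    by_cases hn : n < 10
    · exfalso
      rw [pvDigits_lt hn] at h
      have hlen := congrArg List.length h
      simp at hlen
      exact absurd hlen (pvDigits_ne_nil (m / 10))
    · rw [pvDigits_ge hn] at h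
      obtain ⟨h1, h2⟩ := List.append_inj' h (by simp)
      have hdiv := ih (n / 10) h1
      simp at h2
      have := congrArg Char.toNat h2
      rw [pvDigitChar_toNat _ (Nat.mod_lt _ (by omega)), pvDigitChar_toNat _ (Nat.mod_lt _ (by omega))] at this
      omega

lemma pvToChars_nonneg (n : Int) (h : 0 ≤ n) : PySem.Int.toChars n = pvDigits n.toNat := by
  rw [PySem.Int.toChars, if_neg (by omega), pvDigits_eq_toDigits]

lemma pvSplitDash : ∀ (xs xs' rest rest' : List Char), (∀ c ∈ xs, c ≠ '-') → (∀ c ∈ xs', c ≠ '-') →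
    xs ++ '-' :: rest = xs' ++ '-' :: rest' → xs = xs' ∧ rest = rest' := by
  intro xs
  induction xs with
  | nil =>
    intro xs' rest rest' _ h2 h
    cases xs' with
    | nil => simp_all
    | cons y ys =>
      exfalso
      simp at h
      exact h2 y (by simp) h.1.symm
  | cons x xs ih =>
    intro xs' rest rest' h1 h2 h
    cases xs' with
    | nil =>
      exfalso
      simp at h
      exact h1 x (by simp) h.1
    | cons y ys =>
      simp at h
      obtain ⟨hxy, hrest⟩ := h
      obtain ⟨e1, e2⟩ := ih ys rest rest' (fun c hc => h1 c (by simp [hc])) (fun c hc => h2 c (by simp [hc])) hrest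
      subst hxy e1 e2
      exact ⟨rfl, rfl⟩


lemma pvKey_toList (a b c d : Int) : (pvKey a b c d).toList =
    PySem.Int.toChars a ++ '-' :: (PySem.Int.toChars b ++ '-' :: (PySem.Int.toChars c ++ '-' :: PySem.Int.toChars d)) := by
  simp [pvKey, PySem.Int.toList_toStr]

lemma pvToChars_no_dash (n : Int) (h : 0 ≤ n) : ∀ c ∈ PySem.Int.toChars n, c ≠ '-' := by
  rw [pvToChars_nonneg n h]; exact pvDigits_no_dash n.toNat

lemma pvToChars_inj (m n : Int) (hm : 0 ≤ m) (hn : 0 ≤ n)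
    (h : PySem.Int.toChars m = PySem.Int.toChars n) : m = n := by
  rw [pvToChars_nonneg m hm, pvToChars_nonneg n hn] at h
  have := pvDigits_inj _ _ h
  omega

lemma pvKey_inj (a b c d a' b' c' d' : Int)
    (ha : 0 ≤ a) (hb : 0 ≤ b) (hc : 0 ≤ c) (hd : 0 ≤ d)
    (ha' : 0 ≤ a') (hb' : 0 ≤ b') (hc' : 0 ≤ c') (hd' : 0 ≤ d')
    (h : pvKey a b c d = pvKey a' b' c' d') : a = a' ∧ b = b' ∧ c = c' ∧ d = d' := by
  have hl := congrArg String.toList h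
  rw [pvKey_toList, pvKey_toList] at hl
  obtain ⟨e1, hl⟩ := pvSplitDash _ _ _ _ (pvToChars_no_dash a ha) (pvToChars_no_dash a' ha') hl
  obtain ⟨e2, hl⟩ := pvSplitDash _ _ _ _ (pvToChars_no_dash b hb) (pvToChars_no_dash b' hb') hl
  obtain ⟨e3, e4⟩ := pvSplitDash _ _ _ _ (pvToChars_no_dash c hc) (pvToChars_no_dash c' hc') hl
  exact ⟨pvToChars_inj _ _ ha ha' e1, pvToChars_inj _ _ hb hb' e2,
         pvToChars_inj _ _ hc hc' e3, pvToChars_inj _ _ hd hd' e4⟩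

def pvF (matrix : List (List Int)) (d0 : PySem.Dict String Bool) (r1 c1 r2 c2 : Int) : Bool :=
  if r1 ≥ r2 ∨ c1 ≥ c2 then false
  else
    match d0.get? (pvKey r1 c1 r2 c2) with
    | some v => v
    | none =>
      pvIsSquareOfZeros matrix r1 c1 r2 c2 ||
      pvF matrix d0 (r1 + 1) (c1 + 1) (r2 - 1) (c2 - 1) ||
      pvF matrix d0 r1 (c1 + 1) (r2 - 1) c2 ||
      pvF matrix d0 (r1 + 1) c1 r2 (c2 - 1) ||
      pvF matrix d0 (r1 + 1) (c1 + 1) r2 c2 ||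
      pvF matrix d0 r1 c1 (r2 - 1) (c2 - 1)
termination_by (r2 - r1 + c2 - c1).toNat
decreasing_by all_goals omega

def pvCacheOK (matrix : List (List Int)) (d0 cache : PySem.Dict String Bool) : Prop :=
  (∀ s v, d0.get? s = some v → cache.get? s = some v) ∧
  (∀ s v, cache.get? s = some v → d0.get? s = some v ∨
    ∃ a b c d : Int, 0 ≤ a ∧ 0 ≤ b ∧ a < c ∧ b < d ∧ s = pvKey a b c d ∧ v = pvF matrix d0 a b c d)

lemma pvStep_spec (matrix : List (List Int)) (d0 : PySem.Dict String Bool) (X Y : Bool)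
    (p : Bool × PySem.Dict String Bool) (f : PySem.Dict String Bool → Bool × PySem.Dict String Bool)
    (hp1 : p.1 = X) (hp2 : pvCacheOK matrix d0 p.2)
    (hf : ∀ cch, pvCacheOK matrix d0 cch → (f cch).1 = Y ∧ pvCacheOK matrix d0 (f cch).2) :
    (pvStep p f).1 = (X || Y) ∧ pvCacheOK matrix d0 (pvStep p f).2 := by
  unfold pvStep
  by_cases h : p.1 = true
  · rw [if_pos h]
    rw [h] at hp1
    rw [← hp1]
    simp [h, hp2]
  · simp only [Bool.not_eq_true] at h
    rw [h] at hp1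
    rw [if_neg (by simp [h])]
    obtain ⟨hf1, hf2⟩ := hf p.2 hp2
    rw [← hp1, Bool.false_or]
    exact ⟨hf1, hf2⟩

lemma pvGoA_eq_pvF (matrix : List (List Int)) (d0 : PySem.Dict String Bool) :
    ∀ (N : Nat) (r1 c1 r2 c2 : Int) (cache : PySem.Dict String Bool),
      (r2 - r1 + c2 - c1).toNat ≤ N → 0 ≤ r1 → 0 ≤ c1 → pvCacheOK matrix d0 cache →
      (pvGoA matrix r1 c1 r2 c2 cache).1 = pvF matrix d0 r1 c1 r2 c2 ∧
      pvCacheOK matrix d0 (pvGoA matrix r1 c1 r2 c2 cache).2 := by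
  intro N
  induction N with
  | zero =>
    intro r1 c1 r2 c2 cache hN h1 h2 hok
    have hcond : r1 ≥ r2 ∨ c1 ≥ c2 := by omega
    rw [pvGoA.eq_def, if_pos hcond, pvF.eq_def, if_pos hcond]
    exact ⟨rfl, hok⟩
  | succ N ih =>
    intro r1 c1 r2 c2 cache hN h1 h2 hok
    by_cases hcond : r1 ≥ r2 ∨ c1 ≥ c2
    · rw [pvGoA.eq_def, if_pos hcond, pvF.eq_def, if_pos hcond]
      exact ⟨rfl, hok⟩
    have hr : r1 < r2 := by omega
    have hc : c1 < c2 := by omega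
    cases hcc : cache.get? (pvKey r1 c1 r2 c2) with
    | some v =>
      have hgo : pvGoA matrix r1 c1 r2 c2 cache = (v, cache) := by
        rw [pvGoA.eq_def, if_neg hcond, hcc]
      have hF : pvF matrix d0 r1 c1 r2 c2 = v := by
        rcases hok.2 _ _ hcc with hd | ⟨a, b, c, d, ha, hb, hac, hbd, hkey, hval⟩
        · rw [pvF.eq_def, if_neg hcond, hd]
        · obtain ⟨e1, e2, e3, e4⟩ := pvKey_inj r1 c1 r2 c2 a b c d h1 h2 (by omega) (by omega)
            ha hb (by omega) (by omega) hkey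
          subst e1 e2 e3 e4
          exact hval.symm
      rw [hgo, hF]
      exact ⟨rfl, hok⟩
    | none =>
      have hd0 : d0.get? (pvKey r1 c1 r2 c2) = none := by
        cases hd : d0.get? (pvKey r1 c1 r2 c2) with
        | none => rfl
        | some w => rw [hok.1 _ _ hd] at hcc; cases hcc
      have hF : pvF matrix d0 r1 c1 r2 c2 =
          (pvIsSquareOfZeros matrix r1 c1 r2 c2 ||
           pvF matrix d0 (r1 + 1) (c1 + 1) (r2 - 1) (c2 - 1) ||
           pvF matrix d0 r1 (c1 + 1) (r2 - 1) c2 ||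
           pvF matrix d0 (r1 + 1) c1 r2 (c2 - 1) ||
           pvF matrix d0 (r1 + 1) (c1 + 1) r2 c2 ||
           pvF matrix d0 r1 c1 (r2 - 1) (c2 - 1)) := by
        rw [pvF.eq_def, if_neg hcond, hd0]
      have hgo : pvGoA matrix r1 c1 r2 c2 cache =
          ((pvStep (pvStep (pvStep (pvStep
              (if pvIsSquareOfZeros matrix r1 c1 r2 c2 then (true, cache)
               else pvGoA matrix (r1 + 1) (c1 + 1) (r2 - 1) (c2 - 1) cache)
              (fun cch => pvGoA matrix r1 (c1 + 1) (r2 - 1) c2 cch))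
              (fun cch => pvGoA matrix (r1 + 1) c1 r2 (c2 - 1) cch))
              (fun cch => pvGoA matrix (r1 + 1) (c1 + 1) r2 c2 cch))
              (fun cch => pvGoA matrix r1 c1 (r2 - 1) (c2 - 1) cch)).1,
           (pvStep (pvStep (pvStep (pvStep
              (if pvIsSquareOfZeros matrix r1 c1 r2 c2 then (true, cache)
               else pvGoA matrix (r1 + 1) (c1 + 1) (r2 - 1) (c2 - 1) cache)
              (fun cch => pvGoA matrix r1 (c1 + 1) (r2 - 1) c2 cch))
              (fun cch => pvGoA matrix (r1 + 1) c1 r2 (c2 - 1) cch))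
              (fun cch => pvGoA matrix (r1 + 1) (c1 + 1) r2 c2 cch))
              (fun cch => pvGoA matrix r1 c1 (r2 - 1) (c2 - 1) cch)).2.insert
             (pvKey r1 c1 r2 c2)
           (pvStep (pvStep (pvStep (pvStep
              (if pvIsSquareOfZeros matrix r1 c1 r2 c2 then (true, cache)
               else pvGoA matrix (r1 + 1) (c1 + 1) (r2 - 1) (c2 - 1) cache)
              (fun cch => pvGoA matrix r1 (c1 + 1) (r2 - 1) c2 cch))
              (fun cch => pvGoA matrix (r1 + 1) c1 r2 (c2 - 1) cch))
              (fun cch => pvGoA matrix (r1 + 1) (c1 + 1) r2 c2 cch))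
              (fun cch => pvGoA matrix r1 c1 (r2 - 1) (c2 - 1) cch)).1) := by
        rw [pvGoA.eq_def, if_neg hcond, hcc]
      have h0 : (if pvIsSquareOfZeros matrix r1 c1 r2 c2 then (true, cache)
            else pvGoA matrix (r1+1) (c1+1) (r2-1) (c2-1) cache).1
            = (pvIsSquareOfZeros matrix r1 c1 r2 c2 || pvF matrix d0 (r1+1) (c1+1) (r2-1) (c2-1)) ∧
          pvCacheOK matrix d0 (if pvIsSquareOfZeros matrix r1 c1 r2 c2 then (true, cache)
            else pvGoA matrix (r1+1) (c1+1) (r2-1) (c2-1) cache).2 := by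
        by_cases hsq : pvIsSquareOfZeros matrix r1 c1 r2 c2
        · rw [if_pos hsq, hsq]
          exact ⟨rfl, hok⟩
        · simp only [Bool.not_eq_true] at hsq
          rw [if_neg (by simp [hsq]), hsq, Bool.false_or]
          exact ih (r1+1) (c1+1) (r2-1) (c2-1) cache (by omega) (by omega) (by omega) hok
      have h2' := pvStep_spec matrix d0 _ (pvF matrix d0 r1 (c1+1) (r2-1) c2) _ _ h0.1 h0.2
        (fun cch hc' => ih r1 (c1+1) (r2-1) c2 cch (by omega) (by omega) (by omega) hc')
      have h3' := pvStep_spec matrix d0 _ (pvF matrix d0 (r1+1) c1 r2 (c2-1)) _ _ h2'.1 h2'.2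
        (fun cch hc' => ih (r1+1) c1 r2 (c2-1) cch (by omega) (by omega) (by omega) hc')
      have h4' := pvStep_spec matrix d0 _ (pvF matrix d0 (r1+1) (c1+1) r2 c2) _ _ h3'.1 h3'.2
        (fun cch hc' => ih (r1+1) (c1+1) r2 c2 cch (by omega) (by omega) (by omega) hc')
      have h5' := pvStep_spec matrix d0 _ (pvF matrix d0 r1 c1 (r2-1) (c2-1)) _ _ h4'.1 h4'.2
        (fun cch hc' => ih r1 c1 (r2-1) (c2-1) cch (by omega) (by omega) (by omega) hc')
      rw [hgo, hF]
      refine ⟨h5'.1, ?_, ?_⟩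
      · intro s v hv
        have hne : s ≠ pvKey r1 c1 r2 c2 := by
          intro he; rw [he, hd0] at hv; cases hv
        rw [PySem.Dict.get?_insert, if_neg hne]
        exact h5'.2.1 s v hv
      · intro s v hv
        rw [PySem.Dict.get?_insert] at hv
        by_cases he : s = pvKey r1 c1 r2 c2
        · rw [if_pos he] at hv
          injection hv with hv
          right
          refine ⟨r1, c1, r2, c2, h1, h2, hr, hc, he, ?_⟩
          rw [← hv, h5'.1, hF]
        · rw [if_neg he] at hv
          exact h5'.2.2 s v hv

def pvRightRun (matrix : List (List Int)) (r1 c1 w i j : Int) : Int :=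
  if pvGetv matrix (r1 + i) (c1 + j) = 0 then
    1 + (if h : j < w then pvRightRun matrix r1 c1 w i (j + 1) else 0)
  else 0
termination_by (w - j).toNat
decreasing_by omega

def pvDownRun (matrix : List (List Int)) (r1 c1 h i j : Int) : Int :=
  if pvGetv matrix (r1 + i) (c1 + j) = 0 then
    1 + (if hh : i < h then pvDownRun matrix r1 c1 h (i + 1) j else 0)
  else 0
termination_by (h - i).toNat
decreasing_by omega

lemma pvRightRun_nonneg (matrix : List (List Int)) (r1 c1 w : Int) :
    ∀ i j, 0 ≤ pvRightRun matrix r1 c1 w i j := by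
  intro i j
  rw [pvRightRun.eq_def]
  split_ifs with h1 h2
  · have := pvRightRun_nonneg matrix r1 c1 w i (j + 1)
    omega
  · omega
  · omega
termination_by i j => (w - j).toNat
decreasing_by omega

lemma pvDownRun_nonneg (matrix : List (List Int)) (r1 c1 h : Int) :
    ∀ i j, 0 ≤ pvDownRun matrix r1 c1 h i j := by
  intro i j
  rw [pvDownRun.eq_def]
  split_ifs with h1 h2
  · have := pvDownRun_nonneg matrix r1 c1 h (i + 1) j
    omega
  · omega
  · omega
termination_by i j => (h - i).toNat
decreasing_by omega

lemma pvRightRun_spec (matrix : List (List Int)) (r1 c1 w : Int) :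
    ∀ (n : Nat) (i j : Int), j + n ≤ w →
      (pvRightRun matrix r1 c1 w i j ≥ (n : Int) + 1 ↔
        ∀ u : Int, j ≤ u → u ≤ j + n → pvGetv matrix (r1 + i) (c1 + u) = 0) := by
  intro n
  induction n with
  | zero =>
    intro i j hjw
    rw [pvRightRun.eq_def]
    split_ifs with h1 h2
    · constructor
      · intro _ u hu1 hu2
        have : u = j := by omega
        subst this; exact h1
      · intro _
        have := pvRightRun_nonneg matrix r1 c1 w i (j + 1)
        omega
    · constructor
      · intro _ u hu1 hu2
        have : u = j := by omega
        subst this; exact h1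
      · intro _; omega
    · constructor
      · intro habs; omega
      · intro hz
        exact absurd (hz j (le_refl j) (by omega)) h1
  | succ n ih =>
    intro i j hjw
    rw [pvRightRun.eq_def]
    have hjw' : j < w := by push_cast at hjw ⊢; omega
    rw [dif_pos hjw']
    split_ifs with h1
    · have hih := ih i (j + 1) (by push_cast at hjw ⊢; omega)
      constructor
      · intro hge u hu1 hu2
        rcases eq_or_lt_of_le hu1 with he | hlt
        · subst he; exact h1
        · exact hih.1 (by push_cast at hge ⊢; omega) u (by omega) (by push_cast at hu2 ⊢; omega)
      · intro hz
        have := hih.2 (fun u hu1 hu2 => hz u (by omega) (by push_cast at hu2 ⊢; omega))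
        push_cast at this ⊢; omega
    · constructor
      · intro habs; omega
      · intro hz
        exact absurd (hz j (le_refl j) (by push_cast; omega)) h1

lemma pvDownRun_spec (matrix : List (List Int)) (r1 c1 h : Int) :
    ∀ (n : Nat) (i j : Int), i + n ≤ h →
      (pvDownRun matrix r1 c1 h i j ≥ (n : Int) + 1 ↔
        ∀ u : Int, i ≤ u → u ≤ i + n → pvGetv matrix (r1 + u) (c1 + j) = 0) := by
  intro n
  induction n with
  | zero =>
    intro i j hih
    rw [pvDownRun.eq_def]
    split_ifs with h1 h2
    · constructor
      · intro _ u hu1 hu2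
        have : u = i := by omega
        subst this; exact h1
      · intro _
        have := pvDownRun_nonneg matrix r1 c1 h (i + 1) j
        omega
    · constructor
      · intro _ u hu1 hu2
        have : u = i := by omega
        subst this; exact h1
      · intro _; omega
    · constructor
      · intro habs; omega
      · intro hz
        exact absurd (hz i (le_refl i) (by omega)) h1
  | succ n ih =>
    intro i j hih
    rw [pvDownRun.eq_def]
    have hih' : i < h := by push_cast at hih ⊢; omega
    rw [dif_pos hih']
    split_ifs with h1
    · have hihx := ih (i + 1) j (by push_cast at hih ⊢; omega)
      constructor
      · intro hge u hu1 hu2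
        rcases eq_or_lt_of_le hu1 with he | hlt
        · subst he; exact h1
        · exact hihx.1 (by push_cast at hge ⊢; omega) u (by omega) (by push_cast at hu2 ⊢; omega)
      · intro hz
        have := hihx.2 (fun u hu1 hu2 => hz u (by omega) (by push_cast at hu2 ⊢; omega))
        push_cast at this ⊢; omega
    · constructor
      · intro habs; omega
      · intro hz
        exact absurd (hz i (le_refl i) (by push_cast; omega)) h1

lemma pvRowAux_spec (matrix : List (List Int)) (r1 c1 h w i : Int) (prevD : List Int) (hw : 0 ≤ w)
    (hprev : i < h → ∀ j : Int, 0 ≤ j → j ≤ w →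
      PySem.List.pyGetD prevD j 0 = pvDownRun matrix r1 c1 h (i + 1) j) :
    ∀ k : Nat, (k : Int) ≤ w + 1 →
      pvRowAux matrix r1 c1 h w i prevD k =
        ((PySem.List.pyRange (w + 1 - k) (w + 1) 1).map (fun j => pvRightRun matrix r1 c1 w i j),
         (PySem.List.pyRange (w + 1 - k) (w + 1) 1).map (fun j => pvDownRun matrix r1 c1 h i j)) := by
  intro k
  induction k with
  | zero =>
    intro _
    rw [pvRowAux]
    rw [PySem.List.pyRange_one_eq_nil (by omega)]
    simp
  | succ k ih =>
    intro hk
    rw [pvRowAux, ih (by push_cast at hk ⊢; omega)]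
    have hrange : PySem.List.pyRange (w + 1 - (k + 1 : Nat)) (w + 1) 1 =
        (w - k) :: PySem.List.pyRange (w + 1 - k) (w + 1) 1 := by
      rw [PySem.List.pyRange_one_cons (by push_cast; omega)]
      congr 1 <;> push_cast <;> ring_nf
    rw [hrange]
    simp only [List.map_cons]
    have hRhead : pvRightRun matrix r1 c1 w i (w - k) =
        if pvGetv matrix (r1 + i) (c1 + (w - k)) = 0 then
          1 + (if (w - k) < w then
            ((PySem.List.pyRange (w + 1 - k) (w + 1) 1).map (fun j => pvRightRun matrix r1 c1 w i j)).headD 0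
          else 0) else 0 := by
      rw [pvRightRun.eq_def]
      by_cases hz : pvGetv matrix (r1 + i) (c1 + (w - k)) = 0
      · rw [if_pos hz, if_pos hz]
        by_cases hjw : (w - k) < w
        · rw [dif_pos hjw, if_pos hjw]
          have : PySem.List.pyRange (w + 1 - k) (w + 1) 1 =
              (w + 1 - k) :: PySem.List.pyRange (w + 1 - k + 1) (w + 1) 1 := by
            rw [PySem.List.pyRange_one_cons (by omega)]
          rw [this]
          simp only [List.map_cons, List.headD_cons]
          congr 2
          omega
        · rw [dif_neg hjw, if_neg hjw]
      · rw [if_neg hz, if_neg hz]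
    have hDhead : pvDownRun matrix r1 c1 h i (w - k) =
        if pvGetv matrix (r1 + i) (c1 + (w - k)) = 0 then
          1 + (if i < h then PySem.List.pyGetD prevD (w - k) 0 else 0) else 0 := by
      rw [pvDownRun.eq_def]
      by_cases hz : pvGetv matrix (r1 + i) (c1 + (w - k)) = 0
      · rw [if_pos hz, if_pos hz]
        by_cases hih : i < h
        · rw [dif_pos hih, if_pos hih, hprev hih (w - k) (by push_cast at hk ⊢; omega) (by omega)]
        · rw [dif_neg hih, if_neg hih]
      · rw [if_neg hz, if_neg hz]
    by_cases hz : pvGetv matrix (r1 + i) (c1 + (w - k)) = 0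
    · rw [if_pos (by simp [hz])]
      rw [hRhead, hDhead, if_pos hz, if_pos hz]
    · rw [if_neg (by simp [hz])]
      rw [hRhead, hDhead, if_neg hz, if_neg hz]

lemma pvTables_spec' (matrix : List (List Int)) (r1 c1 h w : Int) (hw : 0 ≤ w) :
    ∀ k : Nat, (k : Int) ≤ h + 1 →
      pvTables matrix r1 c1 h w k =
        ((PySem.List.pyRange (h + 1 - k) (h + 1) 1).map (fun i =>
            (PySem.List.pyRange 0 (w + 1) 1).map (fun j => pvRightRun matrix r1 c1 w i j)),
         (PySem.List.pyRange (h + 1 - k) (h + 1) 1).map (fun i =>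
            (PySem.List.pyRange 0 (w + 1) 1).map (fun j => pvDownRun matrix r1 c1 h i j))) := by
  intro k
  induction k with
  | zero =>
    intro _
    rw [pvTables]
    rw [show PySem.List.pyRange (h + 1 - ((0 : Nat) : Int)) (h + 1) 1 = [] from
      PySem.List.pyRange_one_eq_nil (by norm_num)]
    simp
  | succ k ih =>
    intro hk
    rw [pvTables, ih (by push_cast at hk ⊢; omega)]
    have hprev : (h - (k : Int)) < h → ∀ j : Int, 0 ≤ j → j ≤ w →
        PySem.List.pyGetD
          (((PySem.List.pyRange (h + 1 - k) (h + 1) 1).map (fun i =>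
            (PySem.List.pyRange 0 (w + 1) 1).map (fun j => pvDownRun matrix r1 c1 h i j))).headD []) j 0
          = pvDownRun matrix r1 c1 h ((h - (k : Int)) + 1) j := by
      intro hik j hj0 hjw
      have hk1 : (1 : Int) ≤ (k : Int) := by omega
      have : PySem.List.pyRange (h + 1 - k) (h + 1) 1 =
          (h + 1 - k) :: PySem.List.pyRange (h + 1 - k + 1) (h + 1) 1 := by
        rw [PySem.List.pyRange_one_cons (by omega)]
      rw [this]
      simp only [List.map_cons, List.headD_cons]
      rw [PySem.List.pyGetD_map_pyRange_of_nonneg _ _ _ _ hj0 (by omega)]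
      congr 1
      omega
    rw [pvRowAux_spec matrix r1 c1 h w (h - k) _ hw hprev (w.toNat + 1) (by omega)]
    have hz : w + 1 - ((w.toNat + 1 : Nat) : Int) = 0 := by omega
    rw [hz]
    have hrange : PySem.List.pyRange (h + 1 - (k + 1 : Nat)) (h + 1) 1 =
        (h - k) :: PySem.List.pyRange (h + 1 - k) (h + 1) 1 := by
      rw [PySem.List.pyRange_one_cons (by push_cast; omega)]
      congr 1 <;> push_cast <;> ring_nf
    rw [hrange]
    simp only [List.map_cons]

lemma pvTables_spec (matrix : List (List Int)) (r1 c1 h w : Int) (hh : 0 ≤ h) (hw : 0 ≤ w) :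
    pvTables matrix r1 c1 h w (h.toNat + 1) =
      ((PySem.List.pyRange 0 (h + 1) 1).map fun i =>
        (PySem.List.pyRange 0 (w + 1) 1).map fun j => pvRightRun matrix r1 c1 w i j,
       (PySem.List.pyRange 0 (h + 1) 1).map fun i =>
        (PySem.List.pyRange 0 (w + 1) 1).map fun j => pvDownRun matrix r1 c1 h i j) := by
  rw [pvTables_spec' matrix r1 c1 h w hw (h.toNat + 1) (by omega)]
  have hz : h + 1 - ((h.toNat + 1 : Nat) : Int) = 0 := by omega
  rw [hz]

lemma pvIsSq_iff (matrix : List (List Int)) (a b c d : Int) : pvIsSquareOfZeros matrix a b c d = true ↔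
    ((∀ row : Int, a ≤ row → row ≤ c → (pvGetv matrix row b = 0 ∧ pvGetv matrix row d = 0)) ∧
     (∀ col : Int, b ≤ col → col ≤ d → (pvGetv matrix a col = 0 ∧ pvGetv matrix c col = 0))) := by
  simp [pvIsSquareOfZeros, List.all_eq_true, PySem.List.mem_pyRange_one]

lemma pvRR_abs (matrix : List (List Int)) (r1 c1 w : Int) (x y L : Int) (hL : 1 ≤ L)
    (h2 : y + L - 1 ≤ c1 + w) :
    (pvRightRun matrix r1 c1 w (x - r1) (y - c1) ≥ L ↔
      ∀ col : Int, y ≤ col → col ≤ y + L - 1 → pvGetv matrix x col = 0) := by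
  have hs := pvRightRun_spec matrix r1 c1 w (L - 1).toNat (x - r1) (y - c1) (by omega)
  have hcast : (((L - 1).toNat : Nat) : Int) = L - 1 := by omega
  rw [hcast] at hs
  have hx : r1 + (x - r1) = x := by ring
  rw [hx] at hs
  constructor
  · intro hge col hc1' hc2'
    have := hs.1 (by omega) (col - c1) (by omega) (by omega)
    rwa [show c1 + (col - c1) = col from by ring] at this
  · intro hz
    have := hs.2 (fun u hu1 hu2 => by
      have := hz (c1 + u) (by omega) (by omega)
      exact this)
    omega

lemma pvDR_abs (matrix : List (List Int)) (r1 c1 h : Int) (x y L : Int) (hL : 1 ≤ L)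
    (h2 : x + L - 1 ≤ r1 + h) :
    (pvDownRun matrix r1 c1 h (x - r1) (y - c1) ≥ L ↔
      ∀ row : Int, x ≤ row → row ≤ x + L - 1 → pvGetv matrix row y = 0) := by
  have hs := pvDownRun_spec matrix r1 c1 h (L - 1).toNat (x - r1) (y - c1) (by omega)
  have hcast : (((L - 1).toNat : Nat) : Int) = L - 1 := by omega
  rw [hcast] at hs
  have hy : c1 + (y - c1) = y := by ring
  rw [hy] at hs
  constructor
  · intro hge row hr1' hr2'
    have := hs.1 (by omega) (row - r1) (by omega) (by omega)
    rwa [show r1 + (row - r1) = row from by ring] at this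
  · intro hz
    have := hs.2 (fun u hu1 hu2 => by
      have := hz (r1 + u) (by omega) (by omega)
      exact this)
    omega

-- the O(1) four-run border test equals A's scanned border test
lemma pvBorder_eq_isSq (matrix : List (List Int)) (r1 c1 r2 c2 a b c d : Int)
    (hra : r1 ≤ a) (hac : a < c) (hcr : c ≤ r2) (hcb : c1 ≤ b) (hbd : b < d) (hdc : d ≤ c2) :
    (decide (pvRightRun matrix r1 c1 (c2 - c1) (a - r1) (b - c1) ≥ d - b + 1) &&
     decide (pvRightRun matrix r1 c1 (c2 - c1) (c - r1) (b - c1) ≥ d - b + 1) &&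
     decide (pvDownRun matrix r1 c1 (r2 - r1) (a - r1) (b - c1) ≥ c - a + 1) &&
     decide (pvDownRun matrix r1 c1 (r2 - r1) (a - r1) (d - c1) ≥ c - a + 1)) =
    pvIsSquareOfZeros matrix a b c d := by
  rw [Bool.eq_iff_iff]
  simp only [Bool.and_eq_true, decide_eq_true_eq]
  rw [pvIsSq_iff]
  rw [pvRR_abs matrix r1 c1 (c2 - c1) a b (d - b + 1) (by omega) (by omega)]
  rw [pvRR_abs matrix r1 c1 (c2 - c1) c b (d - b + 1) (by omega) (by omega)]
  rw [pvDR_abs matrix r1 c1 (r2 - r1) a b (c - a + 1) (by omega) (by omega)]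
  rw [pvDR_abs matrix r1 c1 (r2 - r1) a d (c - a + 1) (by omega) (by omega)]
  constructor
  · rintro ⟨⟨⟨hra', hrc'⟩, hda'⟩, hdd'⟩
    constructor
    · intro row h1 h2
      exact ⟨hda' row h1 (by omega), hdd' row h1 (by omega)⟩
    · intro col h1 h2
      exact ⟨hra' col h1 (by omega), hrc' col h1 (by omega)⟩
  · rintro ⟨hrows, hcols⟩
    refine ⟨⟨⟨?_, ?_⟩, ?_⟩, ?_⟩
    · intro col h1 h2; exact (hcols col h1 (by omega)).1
    · intro col h1 h2; exact (hcols col h1 (by omega)).2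
    · intro row h1 h2; exact (hrows row h1 (by omega)).1
    · intro row h1 h2; exact (hrows row h1 (by omega)).2

-- the table of F-values of one shrink level
def pvTbl (matrix : List (List Int)) (d0 : PySem.Dict String Bool) (r1 c1 r2 c2 s : Int) :
    List (List Bool) :=
  if 0 ≤ s ∧ s ≤ min (r2 - r1) (c2 - c1) - 1 then
    (PySem.List.pyRange 0 (s + 1) 1).map fun da =>
      (PySem.List.pyRange 0 (s + 1) 1).map fun db =>
        pvF matrix d0 (r1 + da) (c1 + db) (r2 - (s - da)) (c2 - (s - db))
  else []

lemma pvTbl_get (matrix : List (List Int)) (d0 : PySem.Dict String Bool) (r1 c1 r2 c2 s da db : Int)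
    (hcond : 0 ≤ s ∧ s ≤ min (r2 - r1) (c2 - c1) - 1)
    (hda : 0 ≤ da) (hda2 : da ≤ s) (hdb : 0 ≤ db) (hdb2 : db ≤ s) :
    PySem.List.pyGetD (PySem.List.pyGetD (pvTbl matrix d0 r1 c1 r2 c2 s) da []) db false =
      pvF matrix d0 (r1 + da) (c1 + db) (r2 - (s - da)) (c2 - (s - db)) := by
  rw [pvTbl, if_pos hcond]
  rw [PySem.List.pyGetD_map_pyRange_of_nonneg _ _ _ _ hda (by omega)]
  rw [PySem.List.pyGetD_map_pyRange_of_nonneg _ _ _ _ hdb (by omega)]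

lemma pvTbl_nonempty (matrix : List (List Int)) (d0 : PySem.Dict String Bool) (r1 c1 r2 c2 s : Int)
    (hcond : 0 ≤ s ∧ s ≤ min (r2 - r1) (c2 - c1) - 1) :
    (pvTbl matrix d0 r1 c1 r2 c2 s).isEmpty = false := by
  rw [pvTbl, if_pos hcond, PySem.List.pyRange_one_cons (by omega)]
  simp

lemma pvTbl_empty (matrix : List (List Int)) (d0 : PySem.Dict String Bool) (r1 c1 r2 c2 s : Int)
    (hcond : ¬(0 ≤ s ∧ s ≤ min (r2 - r1) (c2 - c1) - 1)) :
    pvTbl matrix d0 r1 c1 r2 c2 s = [] := by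
  rw [pvTbl, if_neg hcond]

lemma pvRight_get (matrix : List (List Int)) (r1 c1 h w i j : Int)
    (hi : 0 ≤ i) (hi2 : i < h + 1) (hj : 0 ≤ j) (hj2 : j < w + 1) :
    PySem.List.pyGetD (PySem.List.pyGetD
      ((PySem.List.pyRange 0 (h + 1) 1).map fun x =>
        (PySem.List.pyRange 0 (w + 1) 1).map fun y => pvRightRun matrix r1 c1 w x y) i []) j 0 =
    pvRightRun matrix r1 c1 w i j := by
  rw [PySem.List.pyGetD_map_pyRange_of_nonneg _ _ _ _ hi hi2]
  rw [PySem.List.pyGetD_map_pyRange_of_nonneg _ _ _ _ hj hj2]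

lemma pvDown_get (matrix : List (List Int)) (r1 c1 h w i j : Int)
    (hi : 0 ≤ i) (hi2 : i < h + 1) (hj : 0 ≤ j) (hj2 : j < w + 1) :
    PySem.List.pyGetD (PySem.List.pyGetD
      ((PySem.List.pyRange 0 (h + 1) 1).map fun x =>
        (PySem.List.pyRange 0 (w + 1) 1).map fun y => pvDownRun matrix r1 c1 h x y) i []) j 0 =
    pvDownRun matrix r1 c1 h i j := by
  rw [PySem.List.pyGetD_map_pyRange_of_nonneg _ _ _ _ hi hi2]
  rw [PySem.List.pyGetD_map_pyRange_of_nonneg _ _ _ _ hj hj2]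

lemma pvEntryEq (x m1 m2 m3 m4 m5 e1 e2 F1 F2 F3 F4 F5 : Bool)
    (h1 : e1 = false → (m2 = F2 ∧ m3 = F3 ∧ m4 = F4 ∧ m5 = F5))
    (h1' : e1 = true → (F2 = false ∧ F3 = false ∧ F4 = false ∧ F5 = false))
    (h12 : e1 = true → e2 = true)
    (h2 : e2 = false → m1 = F1) (h2' : e2 = true → F1 = false) :
    (if (!(if (!x && !e1) = true then m2 || m3 || m4 || m5 else x) && !e2) = true then m1
     else (if (!x && !e1) = true then m2 || m3 || m4 || m5 else x)) =
    (x || F1 || F2 || F3 || F4 || F5) := by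
  cases e1 with
  | false =>
    obtain ⟨k2, k3, k4, k5⟩ := h1 rfl
    subst k2 k3 k4 k5
    cases e2 with
    | false =>
      have k1 := h2 rfl; subst k1
      cases x <;> cases m1 <;> cases m2 <;> cases m3 <;> cases m4 <;> cases m5 <;> rfl
    | true =>
      have k1 := h2' rfl; subst k1
      cases x <;> cases m2 <;> cases m3 <;> cases m4 <;> cases m5 <;> rfl
  | true =>
    obtain ⟨k2, k3, k4, k5⟩ := h1' rfl
    subst k2 k3 k4 k5
    have he2 := h12 rfl
    subst he2
    have k1 := h2' rfl; subst k1
    cases x <;> rfl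

lemma pvLevel_spec (matrix : List (List Int)) (r1 c1 r2 c2 : Int) (d0 : PySem.Dict String Bool)
    (hr : r1 < r2) (hc : c1 < c2) :
    ∀ s : Int, 0 ≤ s → s ≤ min (r2 - r1) (c2 - c1) - 1 →
      pvLevel r1 c1 r2 c2 d0
        ((PySem.List.pyRange 0 (r2 - r1 + 1) 1).map fun i =>
          (PySem.List.pyRange 0 (c2 - c1 + 1) 1).map fun j => pvRightRun matrix r1 c1 (c2 - c1) i j)
        ((PySem.List.pyRange 0 (r2 - r1 + 1) 1).map fun i =>
          (PySem.List.pyRange 0 (c2 - c1 + 1) 1).map fun j => pvDownRun matrix r1 c1 (r2 - r1) i j)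
        s (pvTbl matrix d0 r1 c1 r2 c2 (s + 1)) (pvTbl matrix d0 r1 c1 r2 c2 (s + 2)) =
      pvTbl matrix d0 r1 c1 r2 c2 s := by
  intro s hs0 hs1
  conv_rhs => rw [pvTbl, if_pos ⟨hs0, hs1⟩]
  simp only [pvLevel]
  apply List.map_congr_left
  intro da hda
  apply List.map_congr_left
  intro db hdb
  rw [PySem.List.mem_pyRange_one] at hda hdb
  have hvalid : ¬(r1 + da ≥ r2 - (s - da) ∨ c1 + db ≥ c2 - (s - db)) := by omega
  conv_rhs => rw [pvF.eq_def]
  rw [if_neg hvalid]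
  cases hkey : d0.get? (pvKey (r1 + da) (c1 + db) (r2 - (s - da)) (c2 - (s - db))) with
  | some v => rfl
  | none =>
    rw [pvRight_get matrix r1 c1 (r2 - r1) (c2 - c1) (r1 + da - r1) (c1 + db - c1)
        (by omega) (by omega) (by omega) (by omega)]
    rw [pvRight_get matrix r1 c1 (r2 - r1) (c2 - c1) (r2 - (s - da) - r1) (c1 + db - c1)
        (by omega) (by omega) (by omega) (by omega)]
    rw [pvDown_get matrix r1 c1 (r2 - r1) (c2 - c1) (r1 + da - r1) (c1 + db - c1)
        (by omega) (by omega) (by omega) (by omega)]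
    rw [pvDown_get matrix r1 c1 (r2 - r1) (c2 - c1) (r1 + da - r1) (c2 - (s - db) - c1)
        (by omega) (by omega) (by omega) (by omega)]
    rw [pvBorder_eq_isSq matrix r1 c1 r2 c2 (r1 + da) (c1 + db) (r2 - (s - da)) (c2 - (s - db))
        (by omega) (by omega) (by omega) (by omega) (by omega) (by omega)]
    have hc1f : (pvTbl matrix d0 r1 c1 r2 c2 (s + 1)).isEmpty = false →
        s + 1 ≤ min (r2 - r1) (c2 - c1) - 1 := by
      intro he
      by_contra hx
      rw [pvTbl_empty matrix d0 r1 c1 r2 c2 (s + 1) (fun hcc => hx hcc.2)] at he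
      simp at he
    have hc2f : (pvTbl matrix d0 r1 c1 r2 c2 (s + 2)).isEmpty = false →
        s + 2 ≤ min (r2 - r1) (c2 - c1) - 1 := by
      intro he
      by_contra hx
      rw [pvTbl_empty matrix d0 r1 c1 r2 c2 (s + 2) (fun hcc => hx hcc.2)] at he
      simp at he
    have hc1t : (pvTbl matrix d0 r1 c1 r2 c2 (s + 1)).isEmpty = true →
        ¬ (s + 1 ≤ min (r2 - r1) (c2 - c1) - 1) := by
      intro he hx
      rw [pvTbl_nonempty matrix d0 r1 c1 r2 c2 (s + 1) ⟨by omega, hx⟩] at he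
      cases he
    have hc2t : (pvTbl matrix d0 r1 c1 r2 c2 (s + 2)).isEmpty = true →
        ¬ (s + 2 ≤ min (r2 - r1) (c2 - c1) - 1) := by
      intro he hx
      rw [pvTbl_nonempty matrix d0 r1 c1 r2 c2 (s + 2) ⟨by omega, hx⟩] at he
      cases he
    refine pvEntryEq _ _ _ _ _ _ _ _ _ _ _ _ _ ?_ ?_ ?_ ?_ ?_
    · intro he
      have hcc : s + 1 ≤ min (r2 - r1) (c2 - c1) - 1 := hc1f he
      refine ⟨?_, ?_, ?_, ?_⟩
      · rw [pvTbl_get matrix d0 r1 c1 r2 c2 (s + 1) da (db + 1) ⟨by omega, hcc⟩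
            (by omega) (by omega) (by omega) (by omega)]
        ring_nf
      · rw [pvTbl_get matrix d0 r1 c1 r2 c2 (s + 1) (da + 1) db ⟨by omega, hcc⟩
            (by omega) (by omega) (by omega) (by omega)]
        ring_nf
      · rw [pvTbl_get matrix d0 r1 c1 r2 c2 (s + 1) (da + 1) (db + 1) ⟨by omega, hcc⟩
            (by omega) (by omega) (by omega) (by omega)]
        ring_nf
      · rw [pvTbl_get matrix d0 r1 c1 r2 c2 (s + 1) da db ⟨by omega, hcc⟩
            (by omega) (by omega) (by omega) (by omega)]
        ring_nf
    · intro he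
      have hcc := hc1t he
      refine ⟨?_, ?_, ?_, ?_⟩ <;> rw [pvF.eq_def, if_pos (by omega)]
    · intro he
      have hcc := hc1t he
      cases h2e : (pvTbl matrix d0 r1 c1 r2 c2 (s + 2)).isEmpty with
      | true => rfl
      | false => exact absurd (hc2f h2e) (by omega)
    · intro he
      have hcc : s + 2 ≤ min (r2 - r1) (c2 - c1) - 1 := hc2f he
      rw [pvTbl_get matrix d0 r1 c1 r2 c2 (s + 2) (da + 1) (db + 1) ⟨by omega, hcc⟩
          (by omega) (by omega) (by omega) (by omega)]
      ring_nf
    · intro he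
      have hcc := hc2t he
      rw [pvF.eq_def, if_pos (by omega)]

lemma pvLevels_spec' (matrix : List (List Int)) (r1 c1 r2 c2 : Int) (d0 : PySem.Dict String Bool)
    (hr : r1 < r2) (hc : c1 < c2) :
    ∀ k : Nat, (k : Int) ≤ min (r2 - r1) (c2 - c1) →
      pvLevels r1 c1 r2 c2 d0
        ((PySem.List.pyRange 0 (r2 - r1 + 1) 1).map fun i =>
          (PySem.List.pyRange 0 (c2 - c1 + 1) 1).map fun j => pvRightRun matrix r1 c1 (c2 - c1) i j)
        ((PySem.List.pyRange 0 (r2 - r1 + 1) 1).map fun i =>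
          (PySem.List.pyRange 0 (c2 - c1 + 1) 1).map fun j => pvDownRun matrix r1 c1 (r2 - r1) i j)
        (min (r2 - r1) (c2 - c1) - 1) k =
      (pvTbl matrix d0 r1 c1 r2 c2 (min (r2 - r1) (c2 - c1) - 1 - k + 1),
       pvTbl matrix d0 r1 c1 r2 c2 (min (r2 - r1) (c2 - c1) - 1 - k + 2)) := by
  intro k
  induction k with
  | zero =>
    intro _
    rw [pvLevels]
    rw [pvTbl_empty matrix d0 r1 c1 r2 c2 _ (by intro hcc; omega)]
    rw [pvTbl_empty matrix d0 r1 c1 r2 c2 _ (by intro hcc; omega)]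
  | succ k ih =>
    intro hk
    rw [pvLevels, ih (by omega)]
    rw [pvLevel_spec matrix r1 c1 r2 c2 d0 hr hc (min (r2 - r1) (c2 - c1) - 1 - (k : Int))
        (by omega) (by omega)]
    have e2 : min (r2 - r1) (c2 - c1) - 1 - ((k + 1 : Nat) : Int) + 1 =
        min (r2 - r1) (c2 - c1) - 1 - (k : Int) := by push_cast; ring
    have e3 : min (r2 - r1) (c2 - c1) - 1 - ((k + 1 : Nat) : Int) + 2 =
        min (r2 - r1) (c2 - c1) - 1 - (k : Int) + 1 := by push_cast; ring
    rw [e2, e3]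

lemma pvAlt_eq_pvF (matrix : List (List Int)) (r1 c1 r2 c2 : Int)
    (cache : List (String × Bool)) (hr : r1 < r2) (hc : c1 < c2) :
    hasSquareOfZeroes_alt matrix r1 c1 r2 c2 cache =
      pvF matrix (cache.foldl (fun d kv => d.insert kv.1 kv.2) PySem.Dict.empty) r1 c1 r2 c2 := by
  rw [hasSquareOfZeroes_alt, if_neg (by omega)]
  simp only []
  rw [pvTables_spec matrix r1 c1 (r2 - r1) (c2 - c1) (by omega) (by omega)]
  rw [pvLevels_spec' matrix r1 c1 r2 c2 _ hr hc ((min (r2 - r1) (c2 - c1) - 1).toNat + 1) (by omega)]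
  have e0 : min (r2 - r1) (c2 - c1) - 1 - (((min (r2 - r1) (c2 - c1) - 1).toNat + 1 : Nat) : Int) + 1
      = 0 := by omega
  rw [e0]
  rw [pvTbl_get matrix _ r1 c1 r2 c2 0 0 0 ⟨le_refl 0, by omega⟩ (le_refl 0) (le_refl 0)
      (le_refl 0) (le_refl 0)]
  ring_nf

-- ===== VERDICT (by name: the statement is the Claim_ definition above) =====
theorem hasSquareOfZeroes_spec : Claim_equal_hasSquareOfZeroes := by
  intro matrix r1 c1 r2 c2 cache _ hpre
  unfold Spec_hasSquareOfZeroes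
  by_cases hcond : r1 ≥ r2 ∨ c1 ≥ c2
  · unfold hasSquareOfZeroes hasSquareOfZeroes_alt
    rw [if_pos hcond, pvGoA.eq_def, if_pos hcond]
  · have hr : r1 < r2 := by omega
    have hc : c1 < c2 := by omega
    have hnn : 0 ≤ r1 ∧ 0 ≤ c1 := by
      rcases hpre with h | h | h
      · omega
      · omega
      · exact ⟨h.1, h.2.1⟩
    unfold hasSquareOfZeroes
    rw [pvAlt_eq_pvF matrix r1 c1 r2 c2 cache hr hc]
    exact (pvGoA_eq_pvF matrix _ (r2 - r1 + c2 - c1).toNat r1 c1 r2 c2 _ (le_refl _) hnn.1 hnn.2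
      ⟨fun s v h => h, fun s v h => Or.inl h⟩).1
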